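-- pv_equiv track=rewrite | github.com/tom-mi/python-async2v | async2v/components/pygame/_layout.py | possible_screen_layouts
-- ===== SOURCE A (Python) =====
-- from typing import Tuple, List
--
-- def possible_screen_layouts(number_of_frames: int) -> List[Tuple[int, int]]:
--     possible_layouts = []
--     best_n_y = number_of_frames + 1
--     for n_x in range(1, number_of_frames + 1):
--         for n_y in range(1, best_n_y):
--             if n_x * n_y >= number_of_frames:
--                 best_n_y = n_y
--                 possible_layouts.append((n_x, n_y))
--                 break
--
--     return possible_layouts
-- ===== SOURCE B (Python) =====
-- from typing import Tuple, List
--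
--
-- def possible_screen_layouts(number_of_frames: int) -> List[Tuple[int, int]]:
--     layouts = []
--     n_x = 1
--     while n_x <= number_of_frames:
--         n_y = -(-number_of_frames // n_x)
--         layouts.append((n_x, n_y))
--         if n_y == 1:
--             break
--         n_x = -(-number_of_frames // (n_y - 1))
--     return layouts
-- ===== Notes on version B (the rewrite author's own statement) =====
-- stated objective: faster
-- what changed: A scans every candidate column count up to N and for each one scans row counts upward to find the first fit; B keeps only the current layout and, after emitting one, jumps the column count directly (via ceiling division) to the least column count whose row count is strictly smaller, so only the roughly sqrt(N)-many distinct layouts are ever visited.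
import Mathlib
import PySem

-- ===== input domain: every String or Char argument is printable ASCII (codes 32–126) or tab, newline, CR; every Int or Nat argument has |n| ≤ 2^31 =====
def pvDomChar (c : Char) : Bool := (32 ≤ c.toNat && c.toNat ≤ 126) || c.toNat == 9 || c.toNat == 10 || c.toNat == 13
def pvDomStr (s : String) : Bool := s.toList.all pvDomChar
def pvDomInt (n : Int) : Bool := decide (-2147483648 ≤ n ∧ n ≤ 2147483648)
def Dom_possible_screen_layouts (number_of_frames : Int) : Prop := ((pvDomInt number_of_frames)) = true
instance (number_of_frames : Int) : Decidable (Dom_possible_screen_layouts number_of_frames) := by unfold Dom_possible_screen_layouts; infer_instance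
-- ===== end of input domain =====

-- B replaces A's nested scan over every (n_x, n_y) with a single loop that jumps
-- between distinct ceiling values (objective: faster).

-- ===== PORT A =====
-- outer loop body: inner 'for n_y in range(1, best_n_y): if n_x*n_y >= N: …; break'
-- is the first element of range(1, best_n_y) satisfying the test (find?).
def pvStepA (N : Int) (st : Int × List (Int × Int)) (n_x : Int) : Int × List (Int × Int) :=
  match (PySem.List.pyRange 1 st.1).find? (fun n_y => decide (N ≤ n_x * n_y)) with
  | some n_y => (n_y, st.2 ++ [(n_x, n_y)])
  | none => st

def possible_screen_layouts (number_of_frames : Int) : List (Int × Int) :=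
  ((PySem.List.pyRange 1 (number_of_frames + 1)).foldl (pvStepA number_of_frames)
    (number_of_frames + 1, [])).2

-- ===== PORT B =====
-- ceiling division -(-N // k), as written in Source B
def pvCld (N k : Int) : Int := -(PySem.Int.floordiv (-N) k)

-- facts about ceiling division, needed for the loop's termination proof
theorem pvCld_bounds (N k : Int) (hk : 0 < k) :
    (pvCld N k - 1) * k < N ∧ N ≤ pvCld N k * k :=
  (PySem.Int.neg_floordiv_neg_eq_iff_of_pos (a := N) (b := k) (q := pvCld N k) hk).mp rfl

theorem pvCld_pos (N k : Int) (hN : 1 ≤ N) (hk : 0 < k) : 1 ≤ pvCld N k := by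
  have h := pvCld_bounds N k hk
  by_contra hq
  have hmul := mul_le_mul_of_nonneg_right (show pvCld N k ≤ 0 by omega) (le_of_lt hk)
  simp at hmul
  omega

-- the jump strictly increases n_x (termination of the while loop)
theorem pvCld_jump_gt (N n_x : Int) (h1 : 1 ≤ n_x) (h2 : n_x ≤ N)
    (hy : pvCld N n_x ≠ 1) : n_x < pvCld N (pvCld N n_x - 1) := by
  have hc := pvCld_bounds N n_x (by omega)
  have h1c : 1 ≤ pvCld N n_x := pvCld_pos N n_x (by omega) (by omega)
  have hcpos : 2 ≤ pvCld N n_x := by omega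
  have hm := pvCld_bounds N (pvCld N n_x - 1) (by omega)
  nlinarith [hc.1, hc.2, hm.1, hm.2]

def pvAltLoop (N n_x : Int) : List (Int × Int) :=
  if h : 1 ≤ n_x ∧ n_x ≤ N then
    if hy : pvCld N n_x = 1 then [(n_x, pvCld N n_x)]
    else (n_x, pvCld N n_x) :: pvAltLoop N (pvCld N (pvCld N n_x - 1))
  else []
termination_by (N + 1 - n_x).toNat
decreasing_by
  have := pvCld_jump_gt N n_x h.1 h.2 hy
  omega

def possible_screen_layouts_alt (number_of_frames : Int) : List (Int × Int) :=
  pvAltLoop number_of_frames 1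

-- ===== PRECONDITION & SPEC =====
def Spec_possible_screen_layouts (number_of_frames : Int) (out : List (Int × Int)) : Prop := out = possible_screen_layouts_alt number_of_frames
instance (number_of_frames : Int) (out : List (Int × Int)) : Decidable (Spec_possible_screen_layouts number_of_frames out) := by unfold Spec_possible_screen_layouts; infer_instance

-- ===== CLAIM (what is proved, stated in full; the proofs are below) =====
def Claim_equal_possible_screen_layouts : Prop := ∀ (number_of_frames : Int), Dom_possible_screen_layouts number_of_frames → Spec_possible_screen_layouts number_of_frames (possible_screen_layouts number_of_frames)

-- ===== LEMMAS AND PROOFS =====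

theorem pvCld_le (N k x : Int) (hk : 0 < k) (hx : N ≤ x * k) : pvCld N k ≤ x := by
  have h := pvCld_bounds N k hk
  by_contra hlt
  push Not at hlt
  nlinarith [h.1]

theorem pvFind_none (p : Int → Bool) (lo b : Int)
    (h : ∀ y, lo ≤ y → y < b → p y = false) :
    (PySem.List.pyRange lo b).find? p = none := by
  rw [List.find?_eq_none]
  intro x hx
  rw [PySem.List.mem_pyRange_one] at hx
  simp [h x hx.1 hx.2]

theorem pvFind_some (p : Int → Bool) (lo b c : Int) (h1 : lo ≤ c) (h2 : c < b)
    (hc : p c = true) (hlt : ∀ y, lo ≤ y → y < c → p y = false) :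
    (PySem.List.pyRange lo b).find? p = some c := by
  have hgen : ∀ (n : Nat) (lo : Int), (c - lo).toNat = n → lo ≤ c →
      (∀ y, lo ≤ y → y < c → p y = false) →
      (PySem.List.pyRange lo b).find? p = some c := by
    intro n
    induction n with
    | zero =>
      intro lo hn hlo _
      have : lo = c := by omega
      subst this
      rw [PySem.List.pyRange_one_cons h2, List.find?_cons_of_pos hc]
    | succ m ih =>
      intro lo hn hlo hbelow
      have hlt' : lo < c := by omega
      rw [PySem.List.pyRange_one_cons (by omega), List.find?_cons_of_neg
        (by simp [hbelow lo le_rfl hlt'])]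
      exact ih (lo + 1) (by omega) (by omega) (fun y hy hyc => hbelow y (by omega) hyc)
  exact hgen (c - lo).toNat lo rfl h1 hlt

-- with best_n_y = 1 the inner range is empty, so the rest of the scan appends nothing
theorem pvScan_one (N : Int) : ∀ (n : Nat) (a : Int) (acc : List (Int × Int)),
    (N + 1 - a).toNat = n →
    ((PySem.List.pyRange a (N + 1)).foldl (pvStepA N) (1, acc)).2 = acc := by
  intro n
  induction n with
  | zero =>
    intro a acc hn
    rw [PySem.List.pyRange_one_eq_nil (by omega)]
    simp
  | succ m ih =>
    intro a acc hn
    rw [PySem.List.pyRange_one_cons (by omega)]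
    have hstep : pvStepA N (1, acc) a = (1, acc) := by
      unfold pvStepA
      rw [show PySem.List.pyRange (1:Int) 1 = [] from PySem.List.pyRange_one_eq_nil le_rfl]
      rfl
    simp only [List.foldl_cons, hstep]
    exact ih (a + 1) acc (by omega)

-- main simulation: A's scan from n_x = a with current best b produces exactly what
-- B's loop produces from the next jump target cld N (b-1)
theorem pvMain (N : Int) (hN : 1 ≤ N) : ∀ (n : Nat) (a b : Int) (acc : List (Int × Int)),
    (N + 1 - a).toNat = n → 2 ≤ b → 1 ≤ a → a ≤ pvCld N (b - 1) →
    ((PySem.List.pyRange a (N + 1)).foldl (pvStepA N) (b, acc)).2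
      = acc ++ pvAltLoop N (pvCld N (b - 1)) := by
  intro n
  induction n using Nat.strong_induction_on with
  | _ n ih =>
    intro a b acc hn hb ha haj
    by_cases hend : N + 1 ≤ a
    · rw [PySem.List.pyRange_one_eq_nil (by omega)]
      rw [pvAltLoop, dif_neg (by omega)]
      simp
    · have haN : a ≤ N := by omega
      rw [PySem.List.pyRange_one_cons (by omega), List.foldl_cons]
      by_cases hhit : a = pvCld N (b - 1)
      · -- the inner loop finds n_y = cld N a, the next point of B's loop
        have hbnds := pvCld_bounds N (b - 1) (by omega)
        have hc := pvCld_bounds N a (by omega)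
        have hc1 : 1 ≤ pvCld N a := pvCld_pos N a hN (by omega)
        have hab : N ≤ a * (b - 1) := by rw [hhit]; exact hbnds.2
        have hcb : pvCld N a ≤ b - 1 :=
          pvCld_le N a (b - 1) (by omega) (by nlinarith)
        have hstep : pvStepA N (b, acc) a = (pvCld N a, acc ++ [(a, pvCld N a)]) := by
          unfold pvStepA
          rw [pvFind_some _ 1 b (pvCld N a) hc1 (by omega)
            (by simp; nlinarith [hc.2])
            (fun y hy hyc => by simp; nlinarith [hc.1])]
        rw [hstep]
        by_cases hc1' : pvCld N a = 1
        · -- best becomes 1: A appends nothing more; B's loop stops (n_y = 1)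
          rw [hc1', pvScan_one N (N + 1 - (a + 1)).toNat (a + 1) _ rfl]
          conv_rhs => rw [← hhit, pvAltLoop]
          rw [dif_pos ⟨ha, haN⟩, dif_pos hc1', hc1']
        · -- best becomes cld N a ≥ 2: recurse; B jumps to cld N (cld N a - 1)
          have hc2 : 2 ≤ pvCld N a := by omega
          have hnext : a + 1 ≤ pvCld N (pvCld N a - 1) := by
            by_contra hno
            push Not at hno
            have hm := pvCld_bounds N (pvCld N a - 1) (by omega)
            nlinarith [hc.1, hm.2]
          rw [ih (N + 1 - (a + 1)).toNat (by omega) (a + 1) (pvCld N a) _ rfl hc2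
            (by omega) hnext]
          conv_rhs => rw [← hhit, pvAltLoop]
          rw [dif_pos ⟨ha, haN⟩, dif_neg hc1']
          simp
      · -- a is below the jump target: the inner loop finds nothing, state unchanged
        have halt : a < pvCld N (b - 1) := lt_of_le_of_ne haj hhit
        have hmiss : N > a * (b - 1) := by
          by_contra hge
          push Not at hge
          have := pvCld_le N (b - 1) a (by omega) hge
          omega
        have hstep : pvStepA N (b, acc) a = (b, acc) := by
          unfold pvStepA
          rw [pvFind_none _ 1 b (fun y hy hyb => by simp; nlinarith)]
        rw [hstep]
        exact ih (N + 1 - (a + 1)).toNat (by omega) (a + 1) b acc rfl hb (by omega) (by omega)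

theorem pvCld_self (N : Int) (hN : 1 ≤ N) : pvCld N N = 1 :=
  (PySem.Int.neg_floordiv_neg_eq_iff_of_pos (by omega)).mpr ⟨by nlinarith, by nlinarith⟩

-- ===== VERDICT (by name: the statement is the Claim_ definition above) =====
theorem possible_screen_layouts_spec : Claim_equal_possible_screen_layouts := by
  intro N _
  unfold Spec_possible_screen_layouts possible_screen_layouts possible_screen_layouts_alt
  by_cases hN : 1 ≤ N
  · have h := pvMain N hN (N + 1 - 1).toNat 1 (N + 1) [] rfl (by omega) le_rfl
      (by rw [show N + 1 - 1 = N by ring, pvCld_self N hN])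
    rw [h, show N + 1 - 1 = N by ring, pvCld_self N hN]
    simp
  · rw [PySem.List.pyRange_one_eq_nil (by omega), pvAltLoop, dif_neg (by omega)]
    rfl
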